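-- pv_equiv track=rewrite | github.com/jonathantsang/CompetitiveProgramming | codeforces/c656/d/d.py | solve
-- ===== SOURCE A (Python) =====
-- def solve(N,S):
-- 	if N == 1:
-- 		return +(S != 'a')
--
-- 	# divide and conquer, returns min cost to make 'c' good
-- 	def dc(s, c, all):
-- 		if len(s) == 1:
-- 			return +(s != c)
--
-- 		# convert all s to char c
-- 		if all:
-- 			amt = 0
-- 			for char in s:
-- 				if char != c:
-- 					amt += 1
-- 			return amt
--
-- 		# need one half 'c'
-- 		# need one half 'c'+1 good
-- 		n = len(s)
-- 		first_half = s[:n//2]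
-- 		second_half = s[n//2:]
-- 		cost1 = dc(first_half, chr(ord(c)+1), False) + dc(second_half, c, True)
-- 		cost2 = dc(second_half, chr(ord(c)+1), False) + dc(first_half, c, True)
--
-- 		return min(cost1, cost2)
--
-- 	# 'a'-good string means
-- 	# one half 'a'
-- 	# one half 'b'-good
-- 	first_half = S[:N//2]
-- 	second_half = S[N//2:]
-- 	cost1 = dc(first_half, chr(ord('a')+1), False) + dc(second_half, 'a', True)
-- 	cost2 = dc(second_half, chr(ord('a')+1), False) + dc(first_half, 'a', True)
--
-- 	return min(cost1, cost2)
-- ===== SOURCE B (Python) =====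
-- def mismatches(s, c):
--     return sum(ch != c for ch in s)
--
-- def c_good(s, c):
--     # min edits to make s c-good: prefix counts per character give O(1)
--     # range-mismatch queries, so the recursion works on index ranges
--     pref = {}
--     for ch in set(s):
--         run = [0]
--         for x in s:
--             run.append(run[-1] + (x == ch))
--         pref[ch] = run
--
--     def mism(lo, hi, c):
--         arr = pref.get(c)
--         if arr is None:
--             return hi - lo
--         return (hi - lo) - (arr[hi] - arr[lo])
--
--     def rec(lo, hi, c):
--         if hi - lo == 1:
--             return mism(lo, hi, c)
--         m = (lo + hi) // 2
--         nxt = chr(ord(c) + 1)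
--         return min(rec(lo, m, nxt) + mism(m, hi, c),
--                    rec(m, hi, nxt) + mism(lo, m, c))
--
--     return rec(0, len(s), c)
--
-- def solve(N, S):
--     if N == 1:
--         return int(S != 'a')
--     first, second = S[:N // 2], S[N // 2:]
--     return min(c_good(first, 'b') + mismatches(second, 'a'),
--                c_good(second, 'b') + mismatches(first, 'a'))
-- ===== Notes on version B (the rewrite author's own statement) =====
-- stated objective: alternative
-- what changed: B splits the string once and, for each half, precomputes per-character prefix-count tables so the divide-and-conquer recursion works on index ranges with O(1) range-mismatch lookups instead of A's slice copies and character-by-character scans at every level; Pre_ excludes only the inputs where a half is empty, on which A recurses forever (RecursionError).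
import Mathlib
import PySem

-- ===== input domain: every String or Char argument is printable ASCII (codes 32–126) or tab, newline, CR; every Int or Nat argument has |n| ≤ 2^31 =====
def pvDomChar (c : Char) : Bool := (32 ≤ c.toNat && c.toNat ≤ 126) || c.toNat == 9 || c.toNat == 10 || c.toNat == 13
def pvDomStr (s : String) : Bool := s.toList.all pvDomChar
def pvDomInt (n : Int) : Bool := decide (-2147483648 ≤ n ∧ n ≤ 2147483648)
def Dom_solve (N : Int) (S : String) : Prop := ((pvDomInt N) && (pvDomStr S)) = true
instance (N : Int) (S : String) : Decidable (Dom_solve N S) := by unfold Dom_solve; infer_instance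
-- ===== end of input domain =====

-- B splits the string once and, for each half, builds per-character prefix-count tables so the
-- divide-and-conquer recursion works on index ranges with O(1) mismatch counts instead of A's
-- slice copies and per-level scans.

-- ===== PORT A =====
-- dc(s, c, all): A's inner divide-and-conquer helper, on List Char.
-- s[:n//2] / s[n//2:] with n = len(s) ≥ 0 are exactly take/drop at n/2.
def dcAF : Nat → List Char → Char → Bool → Int
  | 0, _s, _c, _all => 0   -- fuel exhausted: only reachable where Python's dc recurses forever (excluded by Pre_solve)
  | fuel + 1, s, c, all =>
    if s.length = 1 then (if s = [c] then 0 else 1)                 -- +(s != c)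
    else if all then s.foldl (fun amt ch => if ch ≠ c then amt + 1 else amt) 0
    else
      min (dcAF fuel (s.take (s.length / 2)) (Char.ofNat (c.toNat + 1)) false
             + dcAF fuel (s.drop (s.length / 2)) c true)
          (dcAF fuel (s.drop (s.length / 2)) (Char.ofNat (c.toNat + 1)) false
             + dcAF fuel (s.take (s.length / 2)) c true)

-- fuel = len s is always enough: each recursive call strictly shrinks the slice
def dcA (s : List Char) (c : Char) (all : Bool) : Int := dcAF s.length s c all

def solve (N : Int) (S : String) : Int :=
  if N = 1 then (if S = "a" then 0 else 1)                          -- +(S != 'a')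
  else
    let l := S.toList
    let fh := PySem.List.slice l none (some (PySem.Int.floordiv N 2))   -- S[:N//2]
    let sh := PySem.List.slice l (some (PySem.Int.floordiv N 2)) none   -- S[N//2:]
    min (dcA fh (Char.ofNat ('a'.toNat + 1)) false + dcA sh 'a' true)
        (dcA sh (Char.ofNat ('a'.toNat + 1)) false + dcA fh 'a' true)

-- ===== PORT B =====
-- mismatches(s, c) = sum(ch != c for ch in s)
def mismatches (s : List Char) (c : Char) : Int := (s.countP (fun ch => ch ≠ c) : Int)

-- run = [0]; for x in s: run.append(run[-1] + (x == ch)); run is never empty, so run[-1] is getLastD 0 exactly.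
def prefFor (l : List Char) (c : Char) : List Int :=
  l.foldl (fun run ch => run ++ [run.getLastD 0 + (if ch = c then 1 else 0)]) [0]

-- pref = {ch: prefix-count list of ch} for each distinct ch in s
def buildPref (l : List Char) : PySem.Dict Char (List Int) :=
  (PySem.Set.ofList l).foldl (fun d c => d.insert c (prefFor l c)) PySem.Dict.empty

-- arr[hi], arr[lo]: every call has 0 ≤ lo ≤ hi ≤ len s < len arr, so pyGetD is exact here
def mismB (pref : PySem.Dict Char (List Int)) (lo hi : Int) (c : Char) : Int :=
  match pref.get? c with
  | none => hi - lo
  | some arr => (hi - lo) - (PySem.List.pyGetD arr hi 0 - PySem.List.pyGetD arr lo 0)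

-- rec(lo, hi, c); all index values are nonnegative, so they are ported as Nat
-- (m = (lo+hi)//2 inlined; on Nat, / is exactly Python's // for these nonnegative values;
--  fuel = hi - lo is always enough: each recursive call strictly shrinks the range)
def recBF (pref : PySem.Dict Char (List Int)) : Nat → Nat → Nat → Char → Int
  | 0, _lo, _hi, _c => 0   -- fuel exhausted: only reachable where Python's rec recurses forever (excluded by Pre_solve)
  | fuel + 1, lo, hi, c =>
    if hi - lo = 1 then mismB pref lo hi c
    else
      min (recBF pref fuel lo ((lo + hi) / 2) (Char.ofNat (c.toNat + 1))
             + mismB pref (((lo + hi) / 2 : Nat) : Int) (hi : Int) c)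
          (recBF pref fuel ((lo + hi) / 2) hi (Char.ofNat (c.toNat + 1))
             + mismB pref (lo : Int) (((lo + hi) / 2 : Nat) : Int) c)

def recB (pref : PySem.Dict Char (List Int)) (lo hi : Nat) (c : Char) : Int :=
  recBF pref (hi - lo) lo hi c

-- c_good(s, c) = rec(0, len(s), c) over the prefix tables of s
def cGood (s : List Char) (c : Char) : Int := recB (buildPref s) 0 s.length c

def solve_alt (N : Int) (S : String) : Int :=
  if N = 1 then (if S = "a" then 0 else 1)
  else
    let l := S.toList
    let first := PySem.List.slice l none (some (PySem.Int.floordiv N 2))    -- S[:N//2]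
    let second := PySem.List.slice l (some (PySem.Int.floordiv N 2)) none   -- S[N//2:]
    min (cGood first 'b' + mismatches second 'a')
        (cGood second 'b' + mismatches first 'a')

-- ===== PRECONDITION & SPEC =====
-- Pre_solve excludes exactly the inputs on which A raises RecursionError: unless N == 1, both
-- slices S[:N//2] and S[N//2:] must be nonempty, otherwise A's dc recurses forever on the empty
-- string (B's recursion diverges on those inputs too).
def Pre_solve (N : Int) (S : String) : Prop :=
  N = 1 ∨ (PySem.List.slice S.toList none (some (PySem.Int.floordiv N 2)) ≠ [] ∧
           PySem.List.slice S.toList (some (PySem.Int.floordiv N 2)) none ≠ [])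
instance (N : Int) (S : String) : Decidable (Pre_solve N S) := by unfold Pre_solve; infer_instance

def pvWitness_solve : Int × String := (4, "abca")

def Spec_solve (N : Int) (S : String) (out : Int) : Prop := out = solve_alt N S
instance (N : Int) (S : String) (out : Int) : Decidable (Spec_solve N S out) := by unfold Spec_solve; infer_instance

-- ===== CLAIM =====
def Claim_equal_solve : Prop := ∀ (N : Int) (S : String), Dom_solve N S → Pre_solve N S → Spec_solve N S (solve N S)

-- ===== LEMMAS AND PROOFS =====

-- A's 'all' loop: the number of characters of s differing from c
def cntNe (s : List Char) (c : Char) : Int :=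
  s.foldl (fun amt ch => if ch ≠ c then amt + 1 else amt) 0

theorem cntNe_eq_countP (s : List Char) (c : Char) :
    cntNe s c = ((s.countP (fun ch => ch ≠ c)) : Int) := by
  have h := PySem.List.foldl_ite_add_one (fun ch => ch ≠ c) s 0
  simpa [cntNe] using h

theorem dcAF_irrel (n : Nat) : ∀ (f1 f2 : Nat) (s : List Char) (c : Char) (all : Bool),
    s.length = n → n ≤ f1 → n ≤ f2 → dcAF f1 s c all = dcAF f2 s c all := by
  induction n using Nat.strong_induction_on with
  | _ n ih =>
    intro f1 f2 s c all hn h1 h2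
    rcases n with _ | n
    · -- s = []
      have hs : s = [] := List.length_eq_zero_iff.mp hn
      subst hs
      clear ih h1 h2 hn
      have key : ∀ f (c : Char) (all : Bool), dcAF f ([] : List Char) c all = 0 := by
        intro f
        induction f with
        | zero => intro c all; rfl
        | succ f ihf =>
          intro c all
          rw [dcAF]
          cases all <;> simp [ihf]
      rw [key, key]
    · rcases f1 with _ | f1; · omega
      rcases f2 with _ | f2; · omega
      rw [dcAF, dcAF]
      by_cases hb : s.length = 1
      · rw [if_pos hb, if_pos hb]
      · rw [if_neg hb, if_neg hb]
        cases all
        · simp only [Bool.false_eq_true, if_false]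
          have hge : 2 ≤ s.length := by omega
          have hth : (s.take (s.length / 2)).length = s.length / 2 := by
            simp [List.length_take]; omega
          have hdh : (s.drop (s.length / 2)).length = s.length - s.length / 2 := by
            simp [List.length_drop]
          rw [ih (s.length / 2) (by omega) f1 f2 _ _ _ hth (by omega) (by omega),
              ih (s.length - s.length / 2) (by omega) f1 f2 _ _ _ hdh (by omega) (by omega),
              ih (s.length / 2) (by omega) f1 f2 _ _ _ hth (by omega) (by omega),
              ih (s.length - s.length / 2) (by omega) f1 f2 _ _ _ hdh (by omega) (by omega)]
        · simp

theorem dcA_all (s : List Char) (c : Char) : dcA s c true = cntNe s c := by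
  rcases s with _ | ⟨x, t⟩
  · simp [dcA, dcAF, cntNe]
  · show dcAF (t.length + 1) (x :: t) c true = _
    rw [dcAF]
    split
    · next h1 =>
      obtain ⟨y, hy⟩ := List.length_eq_one_iff.mp h1
      rw [hy]
      by_cases hx : y = c <;> simp [hx, cntNe]
    · simp [cntNe]

theorem dcA_rec (s : List Char) (c : Char) (h : 2 ≤ s.length) :
    dcA s c false
      = min (dcA (s.take (s.length / 2)) (Char.ofNat (c.toNat + 1)) false + dcA (s.drop (s.length / 2)) c true)
            (dcA (s.drop (s.length / 2)) (Char.ofNat (c.toNat + 1)) false + dcA (s.take (s.length / 2)) c true) := by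
  obtain ⟨m, hm⟩ : ∃ m, s.length = m + 1 := ⟨s.length - 1, by omega⟩
  have hth : (s.take (s.length / 2)).length = s.length / 2 := by
    simp [List.length_take]; omega
  have hdh : (s.drop (s.length / 2)).length = s.length - s.length / 2 := by
    simp [List.length_drop]
  show dcAF s.length s c false = _
  rw [hm, dcAF, if_neg (by omega), if_neg (by simp)]
  rw [dcAF_irrel (s.length / 2) m (s.take (s.length / 2)).length _ _ _ hth (by omega) (by omega),
      dcAF_irrel (s.length - s.length / 2) m (s.drop (s.length / 2)).length _ _ _ hdh (by omega) (by omega),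
      dcAF_irrel (s.length - s.length / 2) m (s.drop (s.length / 2)).length _ _ _ hdh (by omega) (by omega),
      dcAF_irrel (s.length / 2) m (s.take (s.length / 2)).length _ _ _ hth (by omega) (by omega),
      ← hm]
  rfl

theorem dcA_base (s : List Char) (c : Char) (all : Bool) (h : s.length = 1) :
    dcA s c all = (if s = [c] then 0 else 1) := by
  show dcAF s.length s c all = _
  rw [h, dcAF, if_pos h]

-- prefFor l c is the prefix-count table of c over l
theorem prefFor_spec (l : List Char) (c : Char) :
    (prefFor l c).length = l.length + 1 ∧
    (prefFor l c).getLastD 0 = ((l.countP (fun ch => ch = c)) : Int) ∧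
    ∀ i : Nat, i ≤ l.length → (prefFor l c).getD i 0 = (((l.take i).countP (fun ch => ch = c)) : Int) := by
  induction l using List.reverseRecOn with
  | nil =>
    refine ⟨rfl, by simp [prefFor], ?_⟩
    intro i hi
    have : i = 0 := by simpa using hi
    subst this; simp [prefFor]
  | append_singleton l x ih =>
    obtain ⟨hlen, hlast, hget⟩ := ih
    have hstep : prefFor (l ++ [x]) c
        = prefFor l c ++ [(prefFor l c).getLastD 0 + (if x = c then 1 else 0)] := by
      simp [prefFor, List.foldl_append]
    have hval : (prefFor l c).getLastD 0 + (if x = c then 1 else 0)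
        = (((l ++ [x]).countP (fun ch => ch = c)) : Int) := by
      rw [hlast, List.countP_append]
      by_cases hx : x = c <;> simp [hx]
    refine ⟨by simp [hstep, hlen], ?_, ?_⟩
    · rw [hstep, List.getLastD_concat, hval]
    · intro i hi
      simp only [List.length_append, List.length_cons, List.length_nil] at hi
      rcases Nat.lt_or_ge i (l.length + 1) with h | h
      · have hi' : i ≤ l.length := by omega
        have h1 : i < (prefFor l c).length := by omega
        rw [hstep, List.getD_append _ _ _ _ h1, hget i hi',
            List.take_append_of_le_length hi']
      · have hi2 : i = l.length + 1 := by omega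
        subst hi2
        rw [hstep, List.take_of_length_le (by simp),
            List.getD_append_right _ _ _ _ (by omega), hlen]
        simpa using hval

theorem buildPref_aux (l : List Char) (x : Char) (ks : List Char) (d : PySem.Dict Char (List Int)) :
    (ks.foldl (fun d c => d.insert c (prefFor l c)) d).get? x
      = if x ∈ ks then some (prefFor l x) else d.get? x := by
  induction ks generalizing d with
  | nil => simp
  | cons k ks ih =>
    simp only [List.foldl_cons, ih, PySem.Dict.get?_insert, List.mem_cons]
    by_cases h1 : x ∈ ks <;> by_cases h2 : x = k <;> simp [h1, h2]

theorem buildPref_get? (l : List Char) (c : Char) :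
    (buildPref l).get? c = if c ∈ l then some (prefFor l c) else none := by
  rw [buildPref, buildPref_aux]
  simp [PySem.Set.mem_ofList, PySem.Dict.empty, PySem.Dict.get?]

theorem countP_ne_eq (s : List Char) (c : Char) :
    s.countP (fun ch => ch ≠ c) = s.length - s.countP (fun ch => ch = c) := by
  have h : (fun ch : Char => decide (ch ≠ c)) = (fun ch => !decide (ch = c)) := by
    funext ch; by_cases h : ch = c <;> simp [h]
  rw [h]
  induction s with
  | nil => simp
  | cons a s ih =>
    have hle := List.countP_le_length (l := s) (p := fun ch => decide (ch = c))
    by_cases ha : a = c <;> simp [ha, ih] <;> omega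

theorem take_split (l : List Char) (lo hi : Nat) (h1 : lo ≤ hi) :
    l.take hi = l.take lo ++ (l.drop lo).take (hi - lo) := by
  rw [← List.take_add, Nat.add_sub_cancel' h1]

theorem mismB_eq (l : List Char) (lo hi : Nat) (c : Char) (h1 : lo ≤ hi) (h2 : hi ≤ l.length) :
    mismB (buildPref l) lo hi c = cntNe ((l.drop lo).take (hi - lo)) c := by
  have hseglen : ((l.drop lo).take (hi - lo)).length = hi - lo := by
    simp [List.length_take, List.length_drop]; omega
  rw [cntNe_eq_countP, countP_ne_eq, hseglen]
  by_cases hc : c ∈ l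
  · obtain ⟨hlen, _, hget⟩ := prefFor_spec l c
    have hsplit : (l.take hi).countP (fun ch => ch = c)
        = (l.take lo).countP (fun ch => ch = c) + ((l.drop lo).take (hi - lo)).countP (fun ch => ch = c) := by
      rw [take_split l lo hi h1, List.countP_append]
    rw [mismB, buildPref_get?, if_pos hc]
    simp only [PySem.List.pyGetD_natCast]
    rw [hget hi h2, hget lo (by omega)]
    have hcle : ((l.drop lo).take (hi - lo)).countP (fun ch => ch = c) ≤ hi - lo := by
      have := List.countP_le_length (l := (l.drop lo).take (hi - lo)) (p := fun ch => ch = c)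
      omega
    push_cast
    omega
  · have hz : ((l.drop lo).take (hi - lo)).countP (fun ch => ch = c) = 0 := by
      rw [List.countP_eq_zero]
      intro a ha hpa
      exact hc (by
        have := List.mem_of_mem_take ha
        have := List.mem_of_mem_drop this
        simpa using (by simp at hpa; subst hpa; exact this))
    rw [mismB, buildPref_get?, if_neg hc]
    simp only [hz]
    omega

theorem recBF_irrel (pref : PySem.Dict Char (List Int)) (n : Nat) :
    ∀ (f1 f2 lo hi : Nat) (c : Char),
    hi - lo = n → 0 < n → n ≤ f1 → n ≤ f2 → recBF pref f1 lo hi c = recBF pref f2 lo hi c := by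
  induction n using Nat.strong_induction_on with
  | _ n ih =>
    intro f1 f2 lo hi c hn h0 h1 h2
    rcases f1 with _ | f1; · omega
    rcases f2 with _ | f2; · omega
    rw [recBF, recBF]
    by_cases hb : hi - lo = 1
    · rw [if_pos hb, if_pos hb]
    · rw [if_neg hb, if_neg hb]
      rw [ih ((lo + hi) / 2 - lo) (by omega) f1 f2 lo ((lo + hi) / 2) _ rfl (by omega) (by omega) (by omega),
          ih (hi - (lo + hi) / 2) (by omega) f1 f2 ((lo + hi) / 2) hi _ rfl (by omega) (by omega) (by omega)]

theorem recB_base (pref : PySem.Dict Char (List Int)) (lo hi : Nat) (c : Char) (h : hi - lo = 1) :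
    recB pref lo hi c = mismB pref lo hi c := by
  rw [recB, h, recBF, if_pos h]

theorem recB_rec (pref : PySem.Dict Char (List Int)) (lo hi : Nat) (c : Char) (h : 2 ≤ hi - lo) :
    recB pref lo hi c
      = min (recB pref lo ((lo + hi) / 2) (Char.ofNat (c.toNat + 1))
               + mismB pref (((lo + hi) / 2 : Nat) : Int) (hi : Int) c)
            (recB pref ((lo + hi) / 2) hi (Char.ofNat (c.toNat + 1))
               + mismB pref (lo : Int) (((lo + hi) / 2 : Nat) : Int) c) := by
  obtain ⟨m, hm⟩ : ∃ m, hi - lo = m + 1 := ⟨hi - lo - 1, by omega⟩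
  rw [recB, hm, recBF, if_neg (by omega)]
  rw [recBF_irrel pref ((lo + hi) / 2 - lo) m ((lo + hi) / 2 - lo) lo ((lo + hi) / 2) _ rfl (by omega) (by omega) (by omega),
      recBF_irrel pref (hi - (lo + hi) / 2) m (hi - (lo + hi) / 2) ((lo + hi) / 2) hi _ rfl (by omega) (by omega) (by omega)]
  rfl

theorem recB_eq (l : List Char) (n lo hi : Nat) (c : Char)
    (hn : hi - lo = n) (h1 : lo < hi) (h2 : hi ≤ l.length) :
    recB (buildPref l) lo hi c = dcA ((l.drop lo).take (hi - lo)) c false := by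
  induction n using Nat.strong_induction_on generalizing lo hi c with
  | _ n ih =>
    subst hn
    have hseglen : ((l.drop lo).take (hi - lo)).length = hi - lo := by
      simp only [List.length_take, List.length_drop]; omega
    by_cases hone : hi - lo = 1
    · rw [recB_base _ _ _ _ hone, mismB_eq l lo hi c (by omega) h2,
          dcA_base _ _ _ (by omega)]
      have hlen1 : ((l.drop lo).take (hi - lo)).length = 1 := by omega
      obtain ⟨x, hx⟩ := List.length_eq_one_iff.mp hlen1
      rw [hx]
      by_cases hxc : x = c <;> simp [hxc, cntNe]
    · have hfh : ((l.drop lo).take (hi - lo)).take ((hi - lo) / 2)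
          = (l.drop lo).take ((lo + hi) / 2 - lo) := by
        rw [List.take_take]; congr 1; omega
      have hsh : ((l.drop lo).take (hi - lo)).drop ((hi - lo) / 2)
          = (l.drop ((lo + hi) / 2)).take (hi - (lo + hi) / 2) := by
        have e1 : (hi - lo) / 2 + lo = (lo + hi) / 2 := by omega
        have e2 : lo + (hi - lo) / 2 = (lo + hi) / 2 := by omega
        have e3 : hi - lo - (hi - lo) / 2 = hi - (lo + hi) / 2 := by omega
        rw [List.drop_take, List.drop_drop]
        first
        | rw [e1, e3] | rw [e2, e3]
      rw [recB_rec _ _ _ _ (by omega),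
          dcA_rec _ _ (by simp only [List.length_take, List.length_drop]; omega), hseglen, hfh, hsh]
      rw [ih ((lo + hi) / 2 - lo) (by omega) lo ((lo + hi) / 2) _ rfl (by omega) (by omega),
          ih (hi - (lo + hi) / 2) (by omega) ((lo + hi) / 2) hi _ rfl (by omega) h2,
          mismB_eq l ((lo + hi) / 2) hi c (by omega) h2,
          mismB_eq l lo ((lo + hi) / 2) c (by omega) (by omega),
          dcA_all, dcA_all]

theorem cGood_eq (s : List Char) (c : Char) (h : s ≠ []) : cGood s c = dcA s c false := by
  have h0 : 0 < s.length := List.length_pos_of_ne_nil h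
  have := recB_eq s s.length 0 s.length c (by omega) h0 le_rfl
  simpa [cGood] using this

theorem mismatches_eq (s : List Char) (c : Char) : mismatches s c = dcA s c true := by
  rw [dcA_all, cntNe_eq_countP, mismatches]

-- ===== VERDICT (by name: the statement is the Claim_ definition above) =====
theorem solve_spec : Claim_equal_solve := by
  intro N S _ hPre
  unfold Spec_solve
  by_cases hN : N = 1
  · simp [solve, solve_alt, hN]
  · rcases hPre with h | ⟨hf, hs⟩
    · exact absurd h hN
    rw [solve, solve_alt, if_neg hN, if_neg hN]
    simp only
    have hb : Char.ofNat ('a'.toNat + 1) = 'b' := by decide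
    rw [hb, cGood_eq _ _ hf, cGood_eq _ _ hs, mismatches_eq, mismatches_eq]
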